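-- pv_equiv track=rewrite | github.com/guanab/dundefcalc | dundefcalc.py | ups_to_max_pro_speed
-- ===== SOURCE A (Python) =====
-- import math
--
-- def ups_to_max_pro_speed(prospeed):
--     """
--     A function to calculate how many upgrades are needed to upgrade a provided
--     projectile speed to 30000
--     Expects a number
--     Returns an integer
--     """
--     prospeed = int(prospeed)
--     if prospeed >= 30000:
--         return 0
--     elif prospeed >= 4800:
--         return int(math.ceil((30000 - prospeed) / 1200))
--     else:
--         ups = 0
--         while prospeed < 30000:
--             quarter = int(math.floor(abs(prospeed) * 0.25))
--             if quarter < 100: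
--                 quarter = 100
--             if quarter > 1200:
--                 quarter = 1200
--             prospeed += quarter
--             ups += 1
--         return ups
-- ===== SOURCE B (Python) =====
-- def ups_to_max_pro_speed(prospeed):
--     """
--     Count upgrades needed to raise a projectile speed to 30000.
--     Single pass: simulate only the growth phase up to 4800 (where the step
--     depends on the current speed), then finish with one integer ceiling
--     division, since every step from 4800 on adds exactly 1200.
--     """
--     p = int(prospeed)
--     ups = 0
--     while p < 4800:
--         p += min(1200, max(100, abs(p) // 4))
--         ups += 1
--     return ups + max(0, (30000 - p + 1199) // 1200)
-- ===== Notes on version B (the rewrite author's own statement) =====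
-- stated objective: simpler
-- what changed: B simulates only the speed-dependent growth phase (loop bounded by 4800, with the clamp written as one min/max expression) and then finishes with a single integer ceiling division, whereas A either uses a float closed form or simulates every step all the way to 30000.
import Mathlib
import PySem

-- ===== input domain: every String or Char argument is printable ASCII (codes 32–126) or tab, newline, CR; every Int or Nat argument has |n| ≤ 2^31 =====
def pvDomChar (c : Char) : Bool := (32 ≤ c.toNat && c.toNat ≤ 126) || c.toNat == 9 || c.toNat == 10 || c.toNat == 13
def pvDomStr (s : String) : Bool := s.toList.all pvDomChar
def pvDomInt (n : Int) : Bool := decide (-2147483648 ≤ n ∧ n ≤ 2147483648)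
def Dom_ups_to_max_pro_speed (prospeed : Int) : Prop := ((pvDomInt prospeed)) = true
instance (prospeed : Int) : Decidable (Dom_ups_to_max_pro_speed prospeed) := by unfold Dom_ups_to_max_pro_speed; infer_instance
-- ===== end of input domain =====

-- B simulates only the speed-dependent growth phase (up to 4800) and finishes
-- with one integer ceiling division, instead of A's full simulation with two
-- arithmetic special cases (objective: simpler).

-- ===== PORT A =====
-- quarter = int(math.floor(abs(prospeed) * 0.25)) followed by the two clamps.
-- floor(|p|*0.25) = |p| // 4 exactly: for |p| ≤ 2^53 the float |p| and |p|*0.25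
-- (a scaling by a power of two) are exact, so this hand-port is exact on Dom.
def quarterA (p : Int) : Int :=
  let q := PySem.Int.floordiv |p| 4
  let q := if q < 100 then (100 : Int) else q
  if q > 1200 then (1200 : Int) else q

-- the while-loop of A's else-branch, state (prospeed, ups); fuel only makes the
-- recursion structural: each step raises p by at least 100, so fuel
-- (30000 - p).toNat is never exhausted before the guard stops the loop
def upsLoopA (fuel : Nat) (p ups : Int) : Int :=
  match fuel with
  | 0 => ups
  | f + 1 => if p < 30000 then upsLoopA f (p + quarterA p) (ups + 1) else ups

def ups_to_max_pro_speed (prospeed : Int) : Int :=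
  if prospeed ≥ 30000 then 0
  else if prospeed ≥ 4800 then
    -- int(math.ceil((30000 - prospeed) / 1200)), ported as the exact integer
    -- ceiling division -((prospeed - 30000) // 1200): exact here because for
    -- 4800 ≤ prospeed < 30000 the float quotient (numerator ≤ 25200) never
    -- rounds across an integer.
    -(PySem.Int.floordiv (prospeed - 30000) 1200)
  else upsLoopA (30000 - prospeed).toNat prospeed 0

-- ===== PORT B =====
-- B's growth-phase loop 'while p < 4800: p += min(1200, max(100, abs(p)//4)); ups += 1',
-- state (p, ups); fuel (4800 - p).toNat suffices since each step adds ≥ 100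
def climbB (fuel : Nat) (p ups : Int) : Int × Int :=
  match fuel with
  | 0 => (p, ups)
  | f + 1 =>
    if p < 4800 then climbB f (p + min 1200 (max 100 (PySem.Int.floordiv |p| 4))) (ups + 1)
    else (p, ups)

def ups_to_max_pro_speed_alt (prospeed : Int) : Int :=
  let r := climbB (4800 - prospeed).toNat prospeed 0
  r.2 + max 0 (PySem.Int.floordiv (30000 - r.1 + 1199) 1200)

-- ===== PRECONDITION & SPEC =====
def Spec_ups_to_max_pro_speed (prospeed : Int) (out : Int) : Prop := out = ups_to_max_pro_speed_alt prospeed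
instance (prospeed : Int) (out : Int) : Decidable (Spec_ups_to_max_pro_speed prospeed out) := by unfold Spec_ups_to_max_pro_speed; infer_instance

-- ===== CLAIM (what is proved, stated in full; the proofs are below) =====
def Claim_equal_ups_to_max_pro_speed : Prop := ∀ (prospeed : Int), Dom_ups_to_max_pro_speed prospeed → Spec_ups_to_max_pro_speed prospeed (ups_to_max_pro_speed prospeed)

-- ===== LEMMAS AND PROOFS =====

-- B's closed tail formula, as a function of the speed p at the end of the climb
def cfB (p : Int) : Int := max 0 (PySem.Int.floordiv (30000 - p + 1199) 1200)

theorem quarterA_eq (p : Int) :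
    quarterA p = min 1200 (max 100 (PySem.Int.floordiv |p| 4)) := by
  unfold quarterA
  dsimp only
  split_ifs <;> omega

theorem quarterA_of_mid (p : Int) (h1 : 4800 ≤ p) : quarterA p = 1200 := by
  rw [quarterA_eq]
  have habs : |p| = p := abs_of_nonneg (by omega)
  rw [habs, PySem.Int.floordiv_eq_ediv_of_pos (by norm_num)]
  omega

theorem upsLoopA_stop (fuel : Nat) (p ups : Int) (h : ¬ p < 30000) :
    upsLoopA fuel p ups = ups := by
  cases fuel with
  | zero => rfl
  | succ f => rw [upsLoopA, if_neg h]

-- from 4800 on every A-step adds exactly 1200, so A's loop computes B's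
-- closed tail formula
theorem upsLoopA_tail (fuel : Nat) (p ups : Int) (h1 : 4800 ≤ p)
    (hfuel : 30000 - p ≤ 100 * fuel) :
    upsLoopA fuel p ups = ups + cfB p := by
  induction fuel generalizing p ups with
  | zero =>
    rw [upsLoopA, cfB, PySem.Int.floordiv_eq_ediv_of_pos (by norm_num)]
    omega
  | succ f ih =>
    by_cases h2 : p < 30000
    · rw [upsLoopA, if_pos h2, quarterA_of_mid p h1,
        ih (p + 1200) (ups + 1) (by omega) (by omega)]
      unfold cfB
      rw [PySem.Int.floordiv_eq_ediv_of_pos (by norm_num),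
        PySem.Int.floordiv_eq_ediv_of_pos (by norm_num)]
      omega
    · rw [upsLoopA_stop _ _ _ h2, cfB,
        PySem.Int.floordiv_eq_ediv_of_pos (by norm_num)]
      omega

-- while both guards hold the two loops take the same step, so A's whole loop
-- equals B's climb followed by the closed tail formula
theorem upsLoopA_eq_climb (fuelB fuelA : Nat) (p ups : Int)
    (hA : 30000 - p ≤ 100 * fuelA) (hB : 4800 - p ≤ 100 * fuelB) :
    upsLoopA fuelA p ups = (climbB fuelB p ups).2 + cfB (climbB fuelB p ups).1 := by
  induction fuelB generalizing fuelA p ups with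
  | zero =>
    rw [climbB]
    exact upsLoopA_tail fuelA p ups (by omega) hA
  | succ f ih =>
    by_cases h : p < 4800
    · rw [climbB, if_pos h]
      cases fuelA with
      | zero => omega
      | succ fA =>
        rw [upsLoopA, if_pos (by omega), quarterA_eq]
        have hge : 100 ≤ min 1200 (max 100 (PySem.Int.floordiv |p| 4)) := by omega
        exact ih fA _ _ (by omega) (by omega)
    · rw [climbB, if_neg h]
      exact upsLoopA_tail fuelA p ups (by omega) hA

-- ===== VERDICT (by name: the statement is the Claim_ definition above) =====
theorem ups_to_max_pro_speed_spec : Claim_equal_ups_to_max_pro_speed := by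
  intro p _
  unfold Spec_ups_to_max_pro_speed ups_to_max_pro_speed ups_to_max_pro_speed_alt
  by_cases h1 : p ≥ 30000
  · rw [if_pos h1]
    have h0 : (4800 - p).toNat = 0 := by omega
    rw [h0, climbB]
    dsimp only
    rw [PySem.Int.floordiv_eq_ediv_of_pos (by norm_num)]
    omega
  · rw [if_neg h1]
    by_cases h2 : p ≥ 4800
    · rw [if_pos h2]
      have h0 : (4800 - p).toNat = 0 := by omega
      rw [h0, climbB]
      dsimp only
      rw [PySem.Int.floordiv_eq_ediv_of_pos (by norm_num),
        PySem.Int.floordiv_eq_ediv_of_pos (by norm_num)]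
      omega
    · rw [if_neg h2,
        upsLoopA_eq_climb (4800 - p).toNat (30000 - p).toNat p 0 (by omega) (by omega)]
      rfl
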